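-- pv_equiv track=rewrite | github.com/haseebzeeshan2010/Codewars | vowel_recognition.py | vowel_recognition
-- ===== SOURCE A (Python) =====
-- def vowel_recognition(input):
--     vowels = set('aeiouAEIOU')
--     s = t = 0
--     for c, e in enumerate(input, 1):
--         if e in vowels:
--             t += c
--         s += t
--     return s
-- ===== SOURCE B (Python) =====
-- def vowel_recognition(input):
--     chars = list(input)
--     n = len(chars)
--     total = 0
--     for p, ch in enumerate(chars, 1):
--         if ch in "aeiouAEIOU":
--             total += p * (n - p + 1)
--     return total
-- ===== Notes on version B (the rewrite author's own statement) =====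
-- stated objective: alternative
-- what changed: Replaces A's two chained accumulators (running vowel-position sum t and its running total s) by a single pass that adds each vowel's closed-form total contribution p*(n-p+1) directly.
import Mathlib
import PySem

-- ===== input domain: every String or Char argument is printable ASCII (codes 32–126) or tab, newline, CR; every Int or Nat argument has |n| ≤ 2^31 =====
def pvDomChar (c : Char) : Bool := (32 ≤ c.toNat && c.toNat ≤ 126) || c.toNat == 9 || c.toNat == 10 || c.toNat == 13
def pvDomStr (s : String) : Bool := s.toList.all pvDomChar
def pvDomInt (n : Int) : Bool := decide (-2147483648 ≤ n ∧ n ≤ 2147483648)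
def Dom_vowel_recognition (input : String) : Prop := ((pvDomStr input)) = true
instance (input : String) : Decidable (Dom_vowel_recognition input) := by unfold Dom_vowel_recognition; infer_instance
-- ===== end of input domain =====

-- B replaces A's chained accumulators by each vowel's closed-form contribution p*(n-p+1); objective: alternative (same O(n) cost, return value only).

-- ===== PORT A =====
def pvVowelsA : PySem.Set Char := PySem.Set.ofList "aeiouAEIOU".toList

-- loop 'for c, e in enumerate(input, 1): if e in vowels: t += c; s += t'
def pvLoopA : List Char → Int → Int → Int → Int
  | [], _, s, _ => s
  | e :: rest, c, s, t =>
    let t' := if pvVowelsA.contains e then t + c else t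
    pvLoopA rest (c + 1) (s + t') t'

def vowel_recognition (input : String) : Int :=
  pvLoopA input.toList 1 0 0

-- ===== PORT B =====
-- loop 'for p, ch in enumerate(chars, 1): if ch in "aeiouAEIOU": total += p*(n-p+1)'
def pvLoopB (n : Int) : List Char → Int → Int → Int
  | [], _, total => total
  | ch :: rest, p, total =>
    pvLoopB n rest (p + 1)
      (total + if "aeiouAEIOU".toList.contains ch then p * (n - p + 1) else 0)

def vowel_recognition_alt (input : String) : Int :=
  let chars := input.toList
  let n : Int := chars.length
  pvLoopB n chars 1 0

-- ===== PRECONDITION & SPEC =====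
def Spec_vowel_recognition (input : String) (out : Int) : Prop := out = vowel_recognition_alt input
instance (input : String) (out : Int) : Decidable (Spec_vowel_recognition input out) := by unfold Spec_vowel_recognition; infer_instance

-- ===== CLAIM (what is proved, stated in full; the proofs are below) =====
def Claim_equal_vowel_recognition : Prop := ∀ (input : String), Dom_vowel_recognition input → Spec_vowel_recognition input (vowel_recognition input)

-- ===== LEMMAS AND PROOFS =====

-- the common value: sum over vowels at position c, c+1, … of position * (remaining length)
def pvG : List Char → Int → Int
  | [], _ => 0
  | e :: rest, c =>
    (if pvVowelsA.contains e then c * (1 + (rest.length : Int)) else 0) + pvG rest (c + 1)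

theorem pvVowel_eq (e : Char) :
    pvVowelsA.contains e = "aeiouAEIOU".toList.contains e := by
  simp [pvVowelsA, PySem.Set.contains]

theorem pvLoopA_eq (l : List Char) (c s t : Int) :
    pvLoopA l c s t = s + t * (l.length : Int) + pvG l c := by
  induction l generalizing c s t with
  | nil => simp [pvLoopA, pvG]
  | cons e rest ih =>
    simp only [pvLoopA, pvG, ih, List.length_cons]
    split_ifs with h <;> push_cast <;> ring

theorem pvLoopB_eq (n : Int) (l : List Char) (p total : Int)
    (h : n - p + 1 = (l.length : Int)) :
    pvLoopB n l p total = total + pvG l p := by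
  induction l generalizing p total with
  | nil => simp [pvLoopB, pvG]
  | cons e rest ih =>
    have h' : n - (p + 1) + 1 = (rest.length : Int) := by
      simp only [List.length_cons] at h; push_cast at h ⊢; omega
    simp only [pvLoopB, pvG, ih _ _ h', pvVowel_eq]
    have : n - p + 1 = 1 + (rest.length : Int) := by
      simp only [List.length_cons] at h; push_cast at h ⊢; omega
    rw [← this]
    split_ifs with hv <;> ring

-- ===== VERDICT (by name: the statement is the Claim_ definition above) =====
theorem vowel_recognition_spec : Claim_equal_vowel_recognition := by
  intro input _
  unfold Spec_vowel_recognition vowel_recognition vowel_recognition_alt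
  rw [pvLoopA_eq, pvLoopB_eq _ _ _ _ (by ring)]
  ring
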